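-- pv_equiv track=rewrite | github.com/tlijkkkk/mark_v | leetcode-practice/leetcode_practice/data_structure/stack+queue+recursion/leetcode1950_max_min_values_all_subarrays.py | max_min_values_all_subarrays
-- ===== SOURCE A (Python) =====
-- from typing import List
--
-- def max_min_values_all_subarrays(nums: List[int]) -> List[int]:
--     n = len(nums)
--     mono_asc: List[int] = []
--
--     mins_range: List[int] = [0] * n
--     result: List[int] = [0] * n
--
--     for i in range(n):
--         while mono_asc and nums[mono_asc[-1]] >= nums[i]:
--             mono_asc.pop()
--
--         if not mono_asc:
--             mins_range[i] = i + 1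
--         else:
--             mins_range[i] = i - mono_asc[-1]
--         mono_asc.append(i)
--
--     mono_desc: List[int] = []
--     for i in range(n -1, -1, -1):
--         while mono_desc and nums[mono_desc[-1]] >= nums[i]:
--             mono_desc.pop()
--
--         if not mono_desc:
--             mins_range[i] += n - i - 1 # -1 for removing the double count
--         else:
--             mins_range[i] += mono_desc[-1] -i - 1 # -1 for removing the double count
--         mono_desc.append(i)
--
--     for i in range(n):
--         result[mins_range[i] - 1] = max(result[mins_range[i] - 1], nums[i])
--
--     for i in range(n - 2, -1, -1):
--         result[i] = max(result[i], result[i + 1])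
--
--     return result
-- ===== SOURCE B (Python) =====
-- from typing import List
--
-- def max_min_values_all_subarrays(nums: List[int]) -> List[int]:
--     # For each element, expand directly to the maximal window where it is the minimum,
--     # then build the suffix-max answer back-to-front.
--     n = len(nums)
--     result = [0] * n
--     for i in range(n):
--         v = nums[i]
--         L = i
--         while L > 0 and nums[L - 1] >= v:
--             L -= 1
--         R = i
--         while R < n - 1 and nums[R + 1] >= v:
--             R += 1
--         length = R - L + 1
--         result[length - 1] = max(result[length - 1], v)
--     out: List[int] = []
--     for v in reversed(result):
--         out.append(max(v, out[-1]) if out else v)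
--     return out[::-1]
-- ===== Notes on version B (the rewrite author's own statement) =====
-- stated objective: alternative
-- what changed: Replaces A's two monotonic-stack sweeps (popping a shared stack to find nearest-smaller boundaries) by a direct per-element expansion: for each i two while loops walk left and right while neighbours are >= nums[i] to get the maximal window where nums[i] is the minimum; the answer is then built back-to-front as a fresh suffix-max list instead of A's in-place backward pass.
import Mathlib
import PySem

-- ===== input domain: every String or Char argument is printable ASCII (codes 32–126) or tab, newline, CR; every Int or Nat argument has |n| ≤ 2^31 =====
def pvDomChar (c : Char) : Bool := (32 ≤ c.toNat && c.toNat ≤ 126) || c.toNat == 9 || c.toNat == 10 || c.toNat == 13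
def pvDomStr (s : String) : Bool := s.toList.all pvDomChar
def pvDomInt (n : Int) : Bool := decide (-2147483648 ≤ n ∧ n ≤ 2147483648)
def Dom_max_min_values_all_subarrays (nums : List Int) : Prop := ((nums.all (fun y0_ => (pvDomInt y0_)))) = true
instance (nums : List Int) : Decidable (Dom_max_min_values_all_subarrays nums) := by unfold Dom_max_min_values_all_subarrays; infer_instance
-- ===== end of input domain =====

-- B replaces A's two monotonic-stack sweeps by a direct per-element window expansion
-- (two while loops per element) and builds the suffix-max answer back-to-front (objective: alternative).

-- ===== PORT A =====
-- every list access in A is in range by construction, so getD is exact here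
def pvGet (nums : List Int) (i : Nat) : Int := nums.getD i 0

-- the 'while mono and nums[mono[-1]] >= nums[i]: mono.pop()' loop (stack head = top)
def popGE (nums : List Int) (v : Int) : List Nat → List Nat
  | [] => []
  | t :: r => if v ≤ pvGet nums t then popGE nums v r else t :: r

def step1 (nums : List Int) (st : List Nat × List Int) (i : Nat) : List Nat × List Int :=
  let s := popGE nums (pvGet nums i) st.1
  let m : Int := match s with
    | [] => (i : Int) + 1
    | t :: _ => (i : Int) - (t : Int)
  (i :: s, st.2.set i m)

def step2 (nums : List Int) (st : List Nat × List Int) (i : Nat) : List Nat × List Int :=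
  let s := popGE nums (pvGet nums i) st.1
  let add : Int := match s with
    | [] => (nums.length : Int) - (i : Int) - 1
    | t :: _ => (t : Int) - (i : Int) - 1
  (i :: s, st.2.set i (st.2.getD i 0 + add))

-- mins_range[i] - 1 is always ≥ 0 in Python, so toNat is exact
def step3 (nums : List Int) (mins : List Int) (res : List Int) (i : Nat) : List Int :=
  let idx := (mins.getD i 0 - 1).toNat
  res.set idx (max (res.getD idx 0) (pvGet nums i))

def step4 (res : List Int) (i : Nat) : List Int :=
  res.set i (max (res.getD i 0) (res.getD (i + 1) 0))

def max_min_values_all_subarrays (nums : List Int) : List Int :=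
  let n := nums.length
  let p1 := (List.range n).foldl (step1 nums) ([], List.replicate n (0 : Int))
  let p2 := ((List.range n).reverse).foldl (step2 nums) ([], p1.2)
  let res1 := (List.range n).foldl (step3 nums p2.2) (List.replicate n (0 : Int))
  ((List.range (n - 1)).reverse).foldl step4 res1

-- ===== PORT B =====
-- all B's accesses are in range too; getD is exact
def bGet (nums : List Int) (i : Nat) : Int := nums.getD i 0

-- 'while L > 0 and nums[L-1] >= v: L -= 1'
def lstep (nums : List Int) (v : Int) : Nat → Nat
  | 0 => 0
  | L + 1 => if v ≤ bGet nums L then lstep nums v L else L + 1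

-- 'while R < n-1 and nums[R+1] >= v: R += 1'; fuel = n - 1 - R keeps the loop bound
def rstep (nums : List Int) (v : Int) : Nat → Nat → Nat
  | R, 0 => R
  | R, f + 1 => if v ≤ bGet nums (R + 1) then rstep nums v (R + 1) f else R

def bPlace (nums : List Int) (res : List Int) (i : Nat) : List Int :=
  let v := bGet nums i
  let L := lstep nums v i
  let R := rstep nums v i (nums.length - 1 - i)
  let len := R - L + 1
  res.set (len - 1) (max (res.getD (len - 1) 0) v)

def bSufStep (acc : List Int) (v : Int) : List Int :=
  match acc with
  | [] => [v]
  | b :: _ => max v b :: acc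

def max_min_values_all_subarrays_alt (nums : List Int) : List Int :=
  let n := nums.length
  let res := (List.range n).foldl (bPlace nums) (List.replicate n (0 : Int))
  (res.reverse).foldl bSufStep []

-- ===== PRECONDITION & SPEC =====
def Spec_max_min_values_all_subarrays (nums : List Int) (out : List Int) : Prop := out = max_min_values_all_subarrays_alt nums
instance (nums : List Int) (out : List Int) : Decidable (Spec_max_min_values_all_subarrays nums out) := by unfold Spec_max_min_values_all_subarrays; infer_instance

-- ===== CLAIM (what is proved, stated in full; the proofs are below) =====
def Claim_equal_max_min_values_all_subarrays : Prop := ∀ (nums : List Int), Dom_max_min_values_all_subarrays nums → Spec_max_min_values_all_subarrays nums (max_min_values_all_subarrays nums)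

-- ===== LEMMAS AND PROOFS =====

theorem bGet_eq (nums : List Int) (i : Nat) : bGet nums i = pvGet nums i := rfl

theorem getD_set_self (l : List Int) (i : Nat) (a : Int) (h : i < l.length) :
    (l.set i a).getD i 0 = a := by simp [List.getD, h]

theorem getD_set_ne (l : List Int) (i j : Nat) (a : Int) (h : i ≠ j) :
    (l.set i a).getD j 0 = l.getD j 0 := by simp [List.getD, List.getElem?_set_ne h]

-- ---- B's left while loop: nearest previous strictly-smaller boundary ----
theorem lstep_le (nums : List Int) (v : Int) (i : Nat) : lstep nums v i ≤ i := by
  induction i with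
  | zero => simp [lstep]
  | succ L ih => simp only [lstep]; split <;> omega

theorem lstep_mem (nums : List Int) (v : Int) (i : Nat) :
    ∀ j, lstep nums v i ≤ j → j < i → v ≤ pvGet nums j := by
  induction i with
  | zero => omega
  | succ L ih =>
    intro j h1 h2
    simp only [lstep] at h1
    split at h1
    · rename_i hc
      rcases Nat.lt_succ_iff_lt_or_eq.1 h2 with h | h
      · exact ih j h1 h
      · subst h; exact hc
    · omega

theorem lstep_skip (nums : List Int) (v : Int) :
    ∀ i m, m ≤ i → (∀ j, m ≤ j → j < i → v ≤ pvGet nums j) →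
    lstep nums v i = lstep nums v m := by
  intro i
  induction i with
  | zero => intro m h _; have : m = 0 := by omega
            rw [this]
  | succ L ih =>
    intro m hm hall
    rcases Nat.eq_or_lt_of_le hm with h | h
    · rw [h]
    · have hL : v ≤ pvGet nums L := hall L (by omega) (by omega)
      simp only [lstep, bGet_eq]
      rw [if_pos hL]
      exact ih m (by omega) (fun j h1 h2 => hall j h1 (by omega))

-- ---- B's right while loop, fuel-free version ----
def rgo (nums : List Int) (v : Int) (R : Nat) : Nat :=
  if h : R + 1 < nums.length ∧ v ≤ pvGet nums (R + 1) then rgo nums v (R + 1) else R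
termination_by nums.length - R
decreasing_by omega

theorem rgo_ge (nums : List Int) (v : Int) (R : Nat) : R ≤ rgo nums v R := by
  fun_induction rgo nums v R with
  | case1 R h ih => omega
  | case2 R h => exact le_refl R

theorem rgo_lt (nums : List Int) (v : Int) (R : Nat) :
    R < nums.length → rgo nums v R < nums.length := by
  fun_induction rgo nums v R with
  | case1 R h ih => intro _; exact ih h.1
  | case2 R h => exact id

theorem rgo_mem (nums : List Int) (v : Int) (R : Nat) :
    ∀ j, R < j → j ≤ rgo nums v R → v ≤ pvGet nums j := by
  fun_induction rgo nums v R with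
  | case1 R h ih =>
    intro j h1 h2
    by_cases hj : j = R + 1
    · rw [hj]; exact h.2
    · exact ih j (by omega) h2
  | case2 R h => intro j h1 h2; omega

theorem rgo_skip_aux (nums : List Int) (v : Int) (m : Nat) (hm : m < nums.length) :
    ∀ d R, m - R = d → R ≤ m → (∀ j, R < j → j ≤ m → v ≤ pvGet nums j) →
    rgo nums v R = rgo nums v m := by
  intro d
  induction d with
  | zero =>
    intro R h1 h2 _
    have : R = m := by omega
    rw [this]
  | succ d ih =>
    intro R h1 h2 h3
    have hR1 : R + 1 ≤ m := by omega
    have hstep : rgo nums v R = rgo nums v (R + 1) := by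
      rw [rgo, dif_pos ⟨by omega, h3 (R + 1) (by omega) hR1⟩]
    rw [hstep]
    exact ih (R + 1) (by omega) hR1 (fun j a b => h3 j (by omega) b)

theorem rgo_skip (nums : List Int) (v : Int) (m R : Nat) (hm : m < nums.length)
    (h2 : R ≤ m) (h3 : ∀ j, R < j → j ≤ m → v ≤ pvGet nums j) :
    rgo nums v R = rgo nums v m :=
  rgo_skip_aux nums v m hm (m - R) R rfl h2 h3

theorem rstep_eq_rgo (nums : List Int) (v : Int) :
    ∀ f R, R < nums.length → f = nums.length - 1 - R →
    rstep nums v R f = rgo nums v R := by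
  intro f
  induction f with
  | zero =>
    intro R h1 h2
    rw [rstep, rgo, dif_neg (by omega)]
  | succ f ih =>
    intro R h1 h2
    rw [rstep]
    by_cases hc : v ≤ bGet nums (R + 1)
    · have hg : rgo nums v R = rgo nums v (R + 1) := by
        conv_lhs => rw [rgo, dif_pos ⟨show R + 1 < nums.length by omega, show v ≤ pvGet nums (R + 1) from hc⟩]
      rw [if_pos hc, ih (R + 1) (by omega) (by omega), ← hg]
    · rw [if_neg hc, rgo, dif_neg (fun h => hc h.2)]

-- the two scan results of element i
def Lb (nums : List Int) (i : Nat) : Nat := lstep nums (pvGet nums i) i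
def Rb (nums : List Int) (i : Nat) : Nat := rgo nums (pvGet nums i) i

-- ---- A's stacks, described as chains of nearest-smaller jumps ----
def chL (nums : List Int) (i : Nat) : List Nat :=
  i :: (let L := lstep nums (pvGet nums i) i
        if h : L = 0 then [] else chL nums (L - 1))
termination_by i
decreasing_by have := lstep_le nums (pvGet nums i) i; omega

def chR (nums : List Int) (i : Nat) : List Nat :=
  i :: (let R := rgo nums (pvGet nums i) i
        if h : i < nums.length ∧ R + 1 < nums.length then chR nums (R + 1) else [])
termination_by nums.length - i
decreasing_by have := rgo_ge nums (pvGet nums i) i; omega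

theorem popGE_chL (nums : List Int) (v : Int) :
    ∀ k, popGE nums v (chL nums k) =
      (if lstep nums v (k + 1) = 0 then [] else chL nums (lstep nums v (k + 1) - 1)) := by
  intro k
  induction k using Nat.strong_induction_on with
  | _ k ih =>
  have hch : chL nums k = k :: (if _h : lstep nums (pvGet nums k) k = 0 then []
      else chL nums (lstep nums (pvGet nums k) k - 1)) := by
    conv_lhs => rw [chL]
  by_cases hv : v ≤ pvGet nums k
  · -- k is popped
    have hstep : lstep nums v (k + 1) = lstep nums v (lstep nums (pvGet nums k) k) := by
      have h1 : lstep nums v (k + 1) = lstep nums v k := by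
        simp only [lstep, bGet_eq]
        rw [if_pos hv]
      rw [h1]
      exact lstep_skip nums v k (lstep nums (pvGet nums k) k)
        (lstep_le nums (pvGet nums k) k)
        (fun j h1 h2 => le_trans hv (lstep_mem nums (pvGet nums k) k j h1 h2))
    rw [hch]
    simp only [popGE]
    rw [if_pos hv]
    by_cases hLk0 : lstep nums (pvGet nums k) k = 0
    · rw [dif_pos hLk0]
      rw [hstep, hLk0]
      simp [popGE, lstep]
    · rw [dif_neg hLk0]
      rw [ih (lstep nums (pvGet nums k) k - 1)
        (by have := lstep_le nums (pvGet nums k) k; omega)]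
      have h11 : lstep nums (pvGet nums k) k - 1 + 1 = lstep nums (pvGet nums k) k := by
        omega
      rw [h11, hstep]
  · -- k stays
    have hl : lstep nums v (k + 1) = k + 1 := by
      simp only [lstep, bGet_eq]
      rw [if_neg hv]
    rw [hch]
    simp only [popGE]
    rw [if_neg hv, hl, if_neg (by omega)]
    simp only [Nat.add_sub_cancel]
    exact hch.symm

theorem popGE_chR (nums : List Int) (v : Int) :
    ∀ d k, nums.length - k = d → k < nums.length →
      popGE nums v (chR nums k) =
        (if v ≤ pvGet nums k then
           (if nums.length ≤ rgo nums v k + 1 then [] else chR nums (rgo nums v k + 1))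
         else chR nums k) := by
  intro d
  induction d using Nat.strong_induction_on with
  | _ d ih =>
  intro k hd hk
  have hchk : chR nums k = k :: (if _h : k < nums.length ∧ rgo nums (pvGet nums k) k + 1 < nums.length
      then chR nums (rgo nums (pvGet nums k) k + 1) else []) := by
    conv_lhs => rw [chR]
  by_cases hv : v ≤ pvGet nums k
  · rw [if_pos hv, hchk]
    simp only [popGE]
    rw [if_pos hv]
    have hRk_lt : rgo nums (pvGet nums k) k < nums.length := rgo_lt nums (pvGet nums k) k hk
    have hskip : rgo nums v k = rgo nums v (rgo nums (pvGet nums k) k) :=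
      rgo_skip nums v (rgo nums (pvGet nums k) k) k hRk_lt (rgo_ge nums (pvGet nums k) k)
        (fun j h1 h2 => le_trans hv (rgo_mem nums (pvGet nums k) k j h1 h2))
    by_cases hb : rgo nums (pvGet nums k) k + 1 < nums.length
    · rw [dif_pos ⟨hk, hb⟩]
      rw [ih (nums.length - (rgo nums (pvGet nums k) k + 1))
        (by have := rgo_ge nums (pvGet nums k) k; omega)
        (rgo nums (pvGet nums k) k + 1) rfl hb]
      have hunf : rgo nums v (rgo nums (pvGet nums k) k)
          = if rgo nums (pvGet nums k) k + 1 < nums.length ∧ v ≤ pvGet nums (rgo nums (pvGet nums k) k + 1)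
            then rgo nums v (rgo nums (pvGet nums k) k + 1) else rgo nums (pvGet nums k) k := by
        conv_lhs => rw [rgo]
        split
        · rfl
        · rfl
      by_cases hv2 : v ≤ pvGet nums (rgo nums (pvGet nums k) k + 1)
      · have hvk : rgo nums v k = rgo nums v (rgo nums (pvGet nums k) k + 1) := by
          rw [hskip, hunf, if_pos ⟨hb, hv2⟩]
        rw [if_pos hv2, hvk]
      · have hvk : rgo nums v k = rgo nums (pvGet nums k) k := by
          rw [hskip, hunf, if_neg (fun h => hv2 h.2)]
        rw [if_neg hv2, hvk, if_neg (show ¬ nums.length ≤ rgo nums (pvGet nums k) k + 1 by omega)]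
    · rw [dif_neg (fun h => hb h.2)]
      have hstop : rgo nums v (rgo nums (pvGet nums k) k) = rgo nums (pvGet nums k) k := by
        conv_lhs => rw [rgo]
        rw [dif_neg (fun h => hb h.1)]
      rw [hskip, hstop, if_pos (by omega)]
      simp [popGE]
  · rw [if_neg hv, hchk]
    simp only [popGE]
    rw [if_neg hv]

-- ---- pass 1 invariant ----
theorem pass1_spec (nums : List Int) :
    ∀ j, j ≤ nums.length →
      (((List.range j).foldl (step1 nums) ([], List.replicate nums.length (0 : Int))).1
        = (if j = 0 then [] else chL nums (j - 1))) ∧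
      (((List.range j).foldl (step1 nums) ([], List.replicate nums.length (0 : Int))).2.length
        = nums.length) ∧
      (∀ i, i < nums.length →
        ((List.range j).foldl (step1 nums) ([], List.replicate nums.length (0 : Int))).2.getD i 0
          = (if i < j then ((i : Int) - (Lb nums i : Int) + 1) else 0)) := by
  intro j
  induction j with
  | zero =>
    intro _
    refine ⟨by simp, by simp, ?_⟩
    intro i hi
    simp
  | succ j ih =>
    intro hj1
    obtain ⟨hst, hlen, hval⟩ := ih (by omega)
    have hjn : j < nums.length := by omega
    rw [List.range_succ, List.foldl_append, List.foldl_cons, List.foldl_nil]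
    set F := (List.range j).foldl (step1 nums) ([], List.replicate nums.length (0 : Int))
    have hs : popGE nums (pvGet nums j) F.1
        = (if Lb nums j = 0 then [] else chL nums (Lb nums j - 1)) := by
      by_cases hj0 : j = 0
      · subst hj0
        rw [hst, if_pos rfl]
        have h0 : Lb nums 0 = 0 := by simp [Lb, lstep]
        rw [if_pos h0]
        simp [popGE]
      · rw [hst, if_neg hj0]
        rw [popGE_chL nums (pvGet nums j) (j - 1)]
        have h1 : j - 1 + 1 = j := by omega
        rw [h1]
        rfl
    have hchj : chL nums j = j :: (if _h : Lb nums j = 0 then [] else chL nums (Lb nums j - 1)) := by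
      unfold Lb
      conv_lhs => rw [chL]
    refine ⟨?_, ?_, ?_⟩
    · -- stack component
      simp only [step1]
      rw [hs, if_neg (show ¬ (j + 1 = 0) by omega)]
      simp only [Nat.add_sub_cancel]
      rw [hchj]
      by_cases h0 : Lb nums j = 0
      · rw [if_pos h0, dif_pos h0]
      · rw [if_neg h0, dif_neg h0]
    · simp only [step1, List.length_set, hlen]
    · intro i hi
      simp only [step1]
      rw [hs]
      by_cases hij : i = j
      · subst hij
        have hilen : i < F.2.length := by rw [hlen]; exact hi
        rw [if_pos (show i < i + 1 by omega)]
        by_cases h0 : Lb nums i = 0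
        · rw [if_pos h0]
          simp only [List.getD, List.getElem?_set_self hilen]
          rw [h0]
          simp
        · rw [if_neg h0]
          have hch2 : chL nums (Lb nums i - 1)
              = (Lb nums i - 1) :: (let L := lstep nums (pvGet nums (Lb nums i - 1)) (Lb nums i - 1)
                 if _h : L = 0 then [] else chL nums (L - 1)) := by
            conv_lhs => rw [chL]
          rw [hch2]
          simp only [List.getD, List.getElem?_set_self hilen, Option.getD_some]
          have h1 : 1 ≤ Lb nums i := Nat.pos_of_ne_zero h0
          push_cast [Nat.cast_sub h1]
          ring
      · rw [List.getD, List.getElem?_set_ne (fun h => hij (by omega)), ← List.getD]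
        rw [hval i hi]
        by_cases hlt : i < j
        · rw [if_pos hlt, if_pos (by omega)]
        · rw [if_neg hlt, if_neg (by omega)]

-- ---- pass 2 invariant (processing indices n-1 … j) ----
theorem pass2_spec (nums : List Int) (mins1 : List Int)
    (hlen1 : mins1.length = nums.length)
    (hval1 : ∀ i, i < nums.length → mins1.getD i 0 = (i : Int) - (Lb nums i : Int) + 1) :
    ∀ d j, nums.length - j = d → j ≤ nums.length →
      ((((List.range' j (nums.length - j)).reverse).foldl (step2 nums) ([], mins1)).1
        = (if j = nums.length then [] else chR nums j)) ∧
      ((((List.range' j (nums.length - j)).reverse).foldl (step2 nums) ([], mins1)).2.length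
        = nums.length) ∧
      (∀ i, i < nums.length →
        (((List.range' j (nums.length - j)).reverse).foldl (step2 nums) ([], mins1)).2.getD i 0
          = (if j ≤ i then ((Rb nums i : Int) - (Lb nums i : Int) + 1)
             else (i : Int) - (Lb nums i : Int) + 1)) := by
  intro d
  induction d with
  | zero =>
    intro j hd hj
    have hjn : j = nums.length := by omega
    subst hjn
    simp only [Nat.sub_self, List.range'_zero, List.reverse_nil, List.foldl_nil]
    refine ⟨by simp, hlen1, ?_⟩
    intro i hi
    rw [if_neg (by omega)]
    exact hval1 i hi
  | succ d ih =>
    intro j hd hj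
    have hjn : j < nums.length := by omega
    have hsplit : (List.range' j (nums.length - j)).reverse
        = (List.range' (j + 1) (nums.length - (j + 1))).reverse ++ [j] := by
      have h1 : nums.length - j = (nums.length - (j + 1)) + 1 := by omega
      rw [h1, List.range'_succ]
      simp
    obtain ⟨hst, hlen, hval⟩ := ih (j + 1) (by omega) (by omega)
    rw [hsplit, List.foldl_append, List.foldl_cons, List.foldl_nil]
    set G := ((List.range' (j + 1) (nums.length - (j + 1))).reverse).foldl (step2 nums) ([], mins1)
    have hs : popGE nums (pvGet nums j) G.1
        = (if nums.length ≤ Rb nums j + 1 then [] else chR nums (Rb nums j + 1)) := by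
      by_cases hj1 : j + 1 = nums.length
      · rw [hst, if_pos hj1]
        have hR : Rb nums j = j := by
          unfold Rb
          conv_lhs => rw [rgo]
          rw [dif_neg (by omega)]
        rw [hR, if_pos (by omega)]
        simp [popGE]
      · rw [hst, if_neg hj1]
        rw [popGE_chR nums (pvGet nums j) (nums.length - (j + 1)) (j + 1) rfl (by omega)]
        have hunf : Rb nums j
            = if j + 1 < nums.length ∧ pvGet nums j ≤ pvGet nums (j + 1)
              then rgo nums (pvGet nums j) (j + 1) else j := by
          unfold Rb
          conv_lhs => rw [rgo]
          split
          · rfl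
          · rfl
        by_cases hv2 : pvGet nums j ≤ pvGet nums (j + 1)
        · have hR : Rb nums j = rgo nums (pvGet nums j) (j + 1) := by
            rw [hunf, if_pos ⟨by omega, hv2⟩]
          rw [if_pos hv2, hR]
        · have hR : Rb nums j = j := by
            rw [hunf, if_neg (fun h => hv2 h.2)]
          rw [if_neg hv2, hR, if_neg (by omega)]
    have hchj : chR nums j = j :: (if _h : j < nums.length ∧ Rb nums j + 1 < nums.length
        then chR nums (Rb nums j + 1) else []) := by
      unfold Rb
      conv_lhs => rw [chR]
    have hRj_lt : Rb nums j < nums.length := rgo_lt nums (pvGet nums j) j hjn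
    refine ⟨?_, ?_, ?_⟩
    · simp only [step2]
      rw [hs, if_neg (show ¬ j = nums.length by omega), hchj]
      by_cases h0 : nums.length ≤ Rb nums j + 1
      · rw [if_pos h0, dif_neg (fun h => by omega)]
      · rw [if_neg h0, dif_pos ⟨hjn, by omega⟩]
    · simp only [step2, List.length_set, hlen]
    · intro i hi
      simp only [step2]
      rw [hs]
      by_cases hij : i = j
      · subst hij
        have hilen : i < G.2.length := by rw [hlen]; exact hi
        rw [if_pos (le_refl i)]
        rw [getD_set_self G.2 i _ hilen, hval i hi, if_neg (by omega)]
        by_cases h0 : nums.length ≤ Rb nums i + 1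
        · rw [if_pos h0]
          have hR : Rb nums i = nums.length - 1 := by omega
          rw [hR]
          have hc : ((nums.length - 1 : Nat) : Int) = (nums.length : Int) - 1 := by omega
          rw [hc]
          ring
        · rw [if_neg h0]
          have hch2 : chR nums (Rb nums i + 1)
              = (Rb nums i + 1) :: (let R := rgo nums (pvGet nums (Rb nums i + 1)) (Rb nums i + 1)
                 if _h : (Rb nums i + 1) < nums.length ∧ R + 1 < nums.length
                 then chR nums (R + 1) else []) := by
            conv_lhs => rw [chR]
          rw [hch2]
          push_cast
          ring
      · rw [getD_set_ne G.2 j i _ (fun h => hij (by omega))]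
        rw [hval i hi]
        by_cases hlt : j + 1 ≤ i
        · rw [if_pos hlt, if_pos (by omega)]
        · rw [if_neg hlt, if_neg (by omega)]

-- ---- suffix maxima ----
def sufmax : List Int → List Int
  | [] => []
  | a :: t =>
    match sufmax t with
    | [] => [a]
    | b :: s => max a b :: b :: s

def descRun : Nat → List Int → List Int
  | 0, r => r
  | j + 1, r => descRun j (step4 r j)

theorem sufmax_length (r : List Int) : (sufmax r).length = r.length := by
  induction r with
  | nil => rfl
  | cons a t ih =>
    simp only [sufmax]
    cases h : sufmax t with
    | nil => simp_all
    | cons b s => simp_all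

theorem sufmax_tail_getD (a : Int) (t : List Int) (k : Nat) (_ht : t ≠ []) :
    (sufmax (a :: t)).getD (k + 1) 0 = (sufmax t).getD k 0 := by
  simp only [sufmax]
  cases h : sufmax t with
  | nil => have := sufmax_length t; simp_all
  | cons b s => simp [List.getD]

theorem sufmax_last (r : List Int) : ∀ m, r.length = m + 1 →
    (sufmax r).getD m 0 = r.getD m 0 := by
  induction r with
  | nil => intro m h; simp at h
  | cons a t ih =>
    intro m h
    cases t with
    | nil =>
      have : m = 0 := by simp at h; omega
      subst this
      simp [sufmax, List.getD]
    | cons b s =>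
      have hm : m = (b :: s).length := by simp at h ⊢; omega
      rw [show m = (m - 1) + 1 by simp [hm]]
      rw [sufmax_tail_getD a (b :: s) (m - 1) (by simp)]
      rw [ih (m - 1) (by simp at h ⊢; omega)]
      simp [List.getD]

theorem sufmax_getD_succ (r : List Int) : ∀ k, k + 1 < r.length →
    (sufmax r).getD k 0 = max (r.getD k 0) ((sufmax r).getD (k + 1) 0) := by
  induction r with
  | nil => intro k h; simp at h
  | cons a t ih =>
    intro k h
    have ht : t ≠ [] := by intro hh; subst hh; simp at h
    cases k with
    | zero =>
      simp only [sufmax]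
      cases hs : sufmax t with
      | nil => have := sufmax_length t; rw [hs] at this; simp at this
               exact absurd (List.length_eq_zero_iff.1 this.symm) ht
      | cons b s => simp [List.getD]
    | succ k =>
      rw [sufmax_tail_getD a t k ht, sufmax_tail_getD a t (k + 1) ht]
      have : (a :: t).getD (k + 1) 0 = t.getD k 0 := by simp [List.getD]
      rw [this]
      exact ih k (by simp at h; omega)

theorem foldl_rev_range_eq_descRun (j : Nat) (r : List Int) :
    ((List.range j).reverse).foldl step4 r = descRun j r := by
  induction j generalizing r with
  | zero => rfl
  | succ j ih =>
    rw [List.range_succ]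
    simp only [List.reverse_append, List.reverse_cons, List.reverse_nil, List.nil_append,
      List.singleton_append, List.foldl_cons]
    exact ih (step4 r j)

theorem descRun_spec : ∀ j r r0, r.length = r0.length → j < r0.length →
      (∀ k, k < j → r.getD k 0 = r0.getD k 0) →
      (∀ k, j ≤ k → k < r0.length → r.getD k 0 = (sufmax r0).getD k 0) →
      descRun j r = sufmax r0 := by
  intro j
  induction j with
  | zero =>
    intro r r0 hlen _ _ hsuf
    simp only [descRun]
    apply List.ext_getElem (by rw [hlen, sufmax_length])
    intro n h1 h2
    have hn : n < r0.length := by omega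
    have := hsuf n (by omega) hn
    rwa [List.getD_eq_getElem r 0 h1, List.getD_eq_getElem (sufmax r0) 0 h2] at this
  | succ j ih =>
    intro r r0 hlen hj hpre hsuf
    simp only [descRun]
    apply ih (step4 r j) r0 (by simp [step4, hlen]) (by omega)
    · intro k hk
      unfold step4
      rw [getD_set_ne r j k _ (by omega)]
      exact hpre k (by omega)
    · intro k hk1 hk2
      unfold step4
      by_cases hkj : k = j
      · subst hkj
        rw [getD_set_self r k _ (by omega)]
        rw [hpre k (by omega)]
        rw [hsuf (k + 1) (by omega) (by omega)]
        exact (sufmax_getD_succ r0 k (by omega)).symm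
      · rw [getD_set_ne r j k _ (fun h => hkj h.symm)]
        exact hsuf k (by omega) hk2

theorem bsuf_eq_sufmax (r : List Int) : (r.reverse).foldl bSufStep [] = sufmax r := by
  induction r with
  | nil => rfl
  | cons a t ih =>
    rw [List.reverse_cons, List.foldl_append, ih, List.foldl_cons, List.foldl_nil]
    simp only [bSufStep, sufmax]
    cases sufmax t with
    | nil => rfl
    | cons b s => rfl

-- ---- folds of set-steps preserve length ----
theorem step3_fold_length (nums mins : List Int) :
    ∀ l r, ((l : List Nat).foldl (step3 nums mins) r).length = r.length := by
  intro l
  induction l with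
  | nil => intro r; rfl
  | cons x xs ih =>
    intro r
    rw [List.foldl_cons, ih]
    simp [step3]

-- ---- the two placement loops coincide ----
theorem place_eq (nums : List Int) (mins2 : List Int)
    (hval2 : ∀ i, i < nums.length →
      mins2.getD i 0 = (Rb nums i : Int) - (Lb nums i : Int) + 1) :
    (List.range nums.length).foldl (step3 nums mins2) (List.replicate nums.length (0 : Int))
      = (List.range nums.length).foldl (bPlace nums) (List.replicate nums.length (0 : Int)) := by
  apply PySem.List.foldl_congr_mem
  intro res i hi
  have hin : i < nums.length := List.mem_range.1 hi
  have hLle : Lb nums i ≤ i := lstep_le nums (pvGet nums i) i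
  have hRge : i ≤ Rb nums i := rgo_ge nums (pvGet nums i) i
  have hidx : (mins2.getD i 0 - 1).toNat = Rb nums i - Lb nums i := by
    rw [hval2 i hin]
    omega
  have hR : rstep nums (pvGet nums i) i (nums.length - 1 - i) = Rb nums i :=
    rstep_eq_rgo nums (pvGet nums i) (nums.length - 1 - i) i hin rfl
  have hL : lstep nums (pvGet nums i) i = Lb nums i := rfl
  have hlen1 : Rb nums i - Lb nums i + 1 - 1 = Rb nums i - Lb nums i := by omega
  simp only [step3, bPlace, bGet_eq, hidx, hR, hL, hlen1]

-- unfolded result of A's first three passes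
theorem main_eq (nums : List Int) :
    max_min_values_all_subarrays nums = max_min_values_all_subarrays_alt nums := by
  unfold max_min_values_all_subarrays max_min_values_all_subarrays_alt
  simp only []
  obtain ⟨_, hlen1, hval1⟩ := pass1_spec nums nums.length (le_refl _)
  set mins1 := ((List.range nums.length).foldl (step1 nums)
    ([], List.replicate nums.length (0 : Int))).2 with hm1
  have hval1' : ∀ i, i < nums.length → mins1.getD i 0 = (i : Int) - (Lb nums i : Int) + 1 := by
    intro i hi
    rw [hval1 i hi, if_pos hi]
  obtain ⟨_, hlen2, hval2⟩ := pass2_spec nums mins1 hlen1 hval1'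
    (nums.length - 0) 0 rfl (by omega)
  have hrr : List.range' 0 (nums.length - 0) = List.range nums.length := by
    rw [Nat.sub_zero, ← List.range_eq_range']
  rw [hrr] at hlen2 hval2
  set mins2 := (((List.range nums.length).reverse).foldl (step2 nums) ([], mins1)).2 with hm2
  have hval2' : ∀ i, i < nums.length →
      mins2.getD i 0 = (Rb nums i : Int) - (Lb nums i : Int) + 1 := by
    intro i hi
    rw [hval2 i hi, if_pos (by omega)]
  rw [place_eq nums mins2 hval2']
  set res1 := (List.range nums.length).foldl (bPlace nums) (List.replicate nums.length (0 : Int))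
    with hres1
  have hreslen : res1.length = nums.length := by
    rw [hres1, ← place_eq nums mins2 hval2', step3_fold_length]
    simp
  rw [bsuf_eq_sufmax res1, foldl_rev_range_eq_descRun]
  rcases Nat.eq_zero_or_pos nums.length with h0 | hpos
  · have : res1 = [] := List.length_eq_zero_iff.1 (by omega)
    rw [this, h0]
    rfl
  · apply descRun_spec (nums.length - 1) res1 res1 rfl (by omega)
    · intro k _; rfl
    · intro k hk1 hk2
      have hk : k = nums.length - 1 := by omega
      subst hk
      exact (sufmax_last res1 (nums.length - 1) (by omega)).symm

-- ===== VERDICT (by name: the statement is the Claim_ definition above) =====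
theorem max_min_values_all_subarrays_spec : Claim_equal_max_min_values_all_subarrays := by
  intro nums _
  unfold Spec_max_min_values_all_subarrays
  exact main_eq nums
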